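-- pv_equiv track=rewrite | github.com/bighorse1911/Generic-Data-Application | src/performance_scaling.py | _parse_target_tables
-- ===== SOURCE A (Python) =====
-- from typing import Any
--
-- def _performance_error(field: str, issue: str, hint: str) -> str:
--     return f"Performance Workbench / {field}: {issue}. Fix: {hint}."
--
-- def _parse_target_tables(value: Any) -> tuple[str, ...]:
--     if value is None:
--         return ()
--     text = str(value).strip()
--     if text == "":
--         return ()
--     parts = [part.strip() for part in text.split(",") if part.strip() != ""]
--     if len(parts) != len(set(parts)):
--         raise ValueError(
--             _performance_error(
--                 "Target tables",
--                 "contains duplicate table names",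
--                 "list each table name once, separated by commas",
--             )
--         )
--     return tuple(parts)
-- ===== SOURCE B (Python) =====
-- def _performance_error(field: str, issue: str, hint: str) -> str:
--     return f"Performance Workbench / {field}: {issue}. Fix: {hint}."
--
-- def _parse_target_tables(value):
--     if value is None:
--         return ()
--     text = str(value).strip()
--     # single character-level scan: build each name between commas, trimming
--     # its surrounding whitespace on the fly (no str.split / per-part strip)
--     tokens = []
--     cur = []   # chars of the current name, left-trimmed, no trailing whitespace
--     pend = []  # whitespace run seen after cur, kept only if another word char follows
--     for ch in text + ',':
--         if ch == ',':
--             if cur: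
--                 tokens.append(''.join(cur))
--             cur = []
--             pend = []
--         elif ch.isspace():
--             if cur:
--                 pend.append(ch)
--         else:
--             cur.extend(pend)
--             pend = []
--             cur.append(ch)
--     # duplicate detection by sorting: equal names become adjacent
--     ordered = sorted(tokens)
--     if any(a == b for a, b in zip(ordered, ordered[1:])):
--         raise ValueError(
--             _performance_error(
--                 "Target tables",
--                 "contains duplicate table names",
--                 "list each table name once, separated by commas",
--             )
--         )
--     return tuple(tokens)
-- ===== Notes on version B (the rewrite author's own statement) =====
-- stated objective: alternative
-- what changed: Replaces split/strip/filter plus a len(set) comparison by a single character-level scanner that builds trimmed names between commas on the fly, and detects duplicates by sorting the names and checking adjacent pairs instead of using a set.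
import Mathlib
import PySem

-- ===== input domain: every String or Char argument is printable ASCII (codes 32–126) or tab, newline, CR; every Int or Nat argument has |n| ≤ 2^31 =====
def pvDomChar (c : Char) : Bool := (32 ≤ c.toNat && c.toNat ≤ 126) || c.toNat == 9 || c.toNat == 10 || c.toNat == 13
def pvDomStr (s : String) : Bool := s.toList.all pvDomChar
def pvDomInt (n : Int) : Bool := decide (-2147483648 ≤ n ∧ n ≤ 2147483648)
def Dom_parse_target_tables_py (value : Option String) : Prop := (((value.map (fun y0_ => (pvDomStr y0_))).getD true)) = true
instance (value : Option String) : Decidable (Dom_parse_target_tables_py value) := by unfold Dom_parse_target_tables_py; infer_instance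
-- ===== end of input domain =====

-- B replaces A's split/strip/filter pipeline + len(set) comparison by a single character-level
-- scanner that builds the trimmed names between commas on the fly, and detects duplicates by
-- sorting the names and checking adjacent pairs (objective: alternative).
-- Pre_ excludes exactly the inputs with a duplicate table name, on which both Pythons raise ValueError.

-- ===== PORT A =====
def parse_target_tables_py (value : Option String) : List String :=
  match value with
  | none => []
  | some v =>
    let text := PySem.Str.strip v
    if text = "" then []
    else
      let parts := ((((PySem.Str.split? text ",").getD [])).map PySem.Str.strip).filter (fun p => p ≠ "")
      if parts.length ≠ (PySem.Set.ofList parts).length then []  -- Python: raise ValueError (outside Pre_)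
      else parts

-- ===== PORT B =====
-- B's for-loop body over the characters of text + ',' ; state = (cur, pend, tokens)
def pvStepB (st : List Char × List Char × List String) (ch : Char) : List Char × List Char × List String :=
  if ch = ',' then
    ([], [], if st.1 = [] then st.2.2 else st.2.2 ++ [String.ofList st.1])
  else if PySem.Chars.isspace ch then
    (if st.1 = [] then st else (st.1, st.2.1 ++ [ch], st.2.2))
  else
    (st.1 ++ st.2.1 ++ [ch], [], st.2.2)

def parse_target_tables_py_alt (value : Option String) : List String :=
  match value with
  | none => []
  | some v =>
    let text := PySem.Str.strip v
    let st := (text.toList ++ [',']).foldl pvStepB ([], [], [])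
    let tokens := st.2.2
    let ordered := PySem.List.sorted tokens (fun x => x) false
    if (ordered.zip (PySem.List.slice ordered (some 1) none)).any (fun p => p.1 == p.2)
    then []  -- Python: raise ValueError (outside Pre_)
    else tokens

-- ===== PRECONDITION & SPEC =====
-- Pre_ excludes exactly the inputs whose stripped non-empty comma-separated parts contain a
-- duplicate: there A (and B) raise ValueError instead of returning.
def Pre_parse_target_tables_py (value : Option String) : Prop :=
  match value with
  | none => True
  | some v =>
    (((((PySem.Str.split? (PySem.Str.strip v) ",").getD [])).map PySem.Str.strip).filter (fun p => p ≠ "")).Nodup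
instance (value : Option String) : Decidable (Pre_parse_target_tables_py value) := by unfold Pre_parse_target_tables_py; cases value <;> infer_instance

def pvWitness_parse_target_tables_py : Option String := some " a, b ,c"

def Spec_parse_target_tables_py (value : Option String) (out : List String) : Prop := out = parse_target_tables_py_alt value
instance (value : Option String) (out : List String) : Decidable (Spec_parse_target_tables_py value out) := by unfold Spec_parse_target_tables_py; infer_instance

-- ===== CLAIM (what is proved, stated in full; the proofs are below) =====
def Claim_equal_parse_target_tables_py : Prop := ∀ (value : Option String), Dom_parse_target_tables_py value → Pre_parse_target_tables_py value → Spec_parse_target_tables_py value (parse_target_tables_py value)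

-- ===== LEMMAS AND PROOFS =====

-- Structural form of Python's s.split(",") on the character list (comma is a single char).
def pvSp : List Char → List (List Char)
  | [] => [[]]
  | c :: rest =>
    if c = ',' then [] :: pvSp rest
    else
      match pvSp rest with
      | [] => [[c]]
      | f :: r => (c :: f) :: r

theorem pvSp_ne_nil (cs : List Char) : pvSp cs ≠ [] := by
  cases cs with
  | nil => simp [pvSp]
  | cons c rest =>
    simp only [pvSp]
    split
    · simp
    · split <;> simp

-- the fuel-based splitOn.go computes pvSp
theorem pvGo_eq (fuel : Nat) : ∀ (l cur : List Char) (accs : List (List Char)),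
    l.length ≤ fuel →
    PySem.Chars.splitOn.go [','] fuel l cur accs =
      accs.reverse ++ (pvSp l).modifyHead (fun f => cur.reverse ++ f) := by
  induction fuel with
  | zero =>
    intro l cur accs hl
    have : l = [] := by
      cases l with
      | nil => rfl
      | cons a t => simp at hl
    subst this
    rw [PySem.Chars.splitOn.go]
    simp [pvSp]
  | succ fuel ih =>
    intro l cur accs hl
    cases l with
    | nil =>
      rw [PySem.Chars.splitOn.go]
      simp [pvSp]
      omega
    | cons c rest =>
      rw [PySem.Chars.splitOn.go]
      by_cases hc : c = ','
      · subst hc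
        have hpre : [','].isPrefixOf (',' :: rest) = true := by simp [List.isPrefixOf]
        simp only [hpre, if_pos]
        rw [ih _ _ _ (by simpa using Nat.le_of_succ_le_succ hl)]
        obtain ⟨f, r, hfr⟩ : ∃ f r, pvSp rest = f :: r := by
          cases h : pvSp rest with
          | nil => exact absurd h (pvSp_ne_nil rest)
          | cons f r => exact ⟨f, r, rfl⟩
        simp [pvSp, hfr, List.modifyHead]
      · have hpre : [','].isPrefixOf (c :: rest) = false := by
          simp [List.isPrefixOf, beq_iff_eq]; exact fun h => absurd h.symm hc
        simp only [hpre, Bool.false_eq_true, if_false]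
        rw [ih _ _ _ (by simpa using Nat.le_of_succ_le_succ hl)]
        obtain ⟨f, r, hfr⟩ : ∃ f r, pvSp rest = f :: r := by
          cases h : pvSp rest with
          | nil => exact absurd h (pvSp_ne_nil rest)
          | cons f r => exact ⟨f, r, rfl⟩
        simp [pvSp, hc, hfr, List.modifyHead]

theorem pvSplitOn_eq (cs : List Char) : PySem.Chars.splitOn cs [','] = pvSp cs := by
  rw [PySem.Chars.splitOn, pvGo_eq (cs.length + 1) cs [] [] (by omega)]
  obtain ⟨f, r, hfr⟩ : ∃ f r, pvSp cs = f :: r := by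
    cases h : pvSp cs with
    | nil => exact absurd h (pvSp_ne_nil cs)
    | cons f r => exact ⟨f, r, rfl⟩
  simp [hfr, List.modifyHead]

theorem pvSp_no_comma {xs : List Char} (h : ',' ∉ xs) : pvSp xs = [xs] := by
  induction xs with
  | nil => rfl
  | cons c rest ih =>
    simp only [List.mem_cons, not_or] at h
    simp [pvSp, Ne.symm h.1, ih h.2]

theorem pvSp_comma_split {xs : List Char} (ys : List Char) (h : ',' ∉ xs) :
    pvSp (xs ++ ',' :: ys) = xs :: pvSp ys := by
  induction xs with
  | nil => simp [pvSp]
  | cons c rest ih =>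
    simp only [List.mem_cons, not_or] at h
    simp [pvSp, Ne.symm h.1, ih h.2]

-- tokens of a character list: strip each comma-field, drop the empty ones
def pvTok (cs : List Char) : List String :=
  (((pvSp cs).map PySem.Chars.strip).filter (fun p => p ≠ [])).map String.ofList

-- stripping a field made of an already-trimmed name followed by pending whitespace gives the name back
theorem pvStrip_shape {cur pend : List Char}
    (hP : pend.all PySem.Chars.isspace = true)
    (hH : ∀ c, cur.head? = some c → PySem.Chars.isspace c = false)
    (hT : ∀ c, cur.getLast? = some c → PySem.Chars.isspace c = false)
    (hE : cur = [] → pend = []) :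
    PySem.Chars.strip (cur ++ pend) = cur := by
  rcases List.eq_nil_or_concat cur with hnil | ⟨xs, d, hcd⟩
  · simp [hnil, hE hnil, PySem.Chars.strip, PySem.Chars.lstrip, PySem.Chars.rstrip]
  · subst hcd
    have hd : PySem.Chars.isspace d = false := hT d (by simp)
    have hlst : PySem.Chars.lstrip ((xs.concat d) ++ pend) = (xs.concat d) ++ pend := by
      cases xs with
      | nil =>
        simp only [List.concat_eq_append, List.nil_append, List.cons_append]
        simp [PySem.Chars.lstrip, List.dropWhile_cons, hd]
      | cons a t =>
        have ha : PySem.Chars.isspace a = false := hH a (by simp)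
        simp only [List.concat_eq_append, List.cons_append]
        simp [PySem.Chars.lstrip, List.dropWhile_cons, ha]
    have hws : List.dropWhile PySem.Chars.isspace pend.reverse = [] := by
      rw [List.dropWhile_eq_nil_iff]
      intro x hx
      exact (List.all_eq_true.mp hP) x (List.mem_reverse.mp hx)
    unfold PySem.Chars.strip
    rw [hlst]
    unfold PySem.Chars.rstrip
    rw [List.reverse_append, List.dropWhile_append, hws]
    simp [List.dropWhile_cons, hd]

-- B's scanner over one comma-terminated text produces exactly its stripped non-empty fields
theorem pvLoop_eq : ∀ (cs cur pend : List Char) (toks : List String),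
    pend.all PySem.Chars.isspace = true →
    (∀ c, cur.head? = some c → PySem.Chars.isspace c = false) →
    (∀ c, cur.getLast? = some c → PySem.Chars.isspace c = false) →
    (cur = [] → pend = []) → ',' ∉ cur →
    (cs ++ [',']).foldl pvStepB (cur, pend, toks) = ([], [], toks ++ pvTok (cur ++ pend ++ cs)) := by
  intro cs
  induction cs with
  | nil =>
    intro cur pend toks hP hH hT hE hC
    have hCP : ',' ∉ pend := by
      intro hm
      have := (List.all_eq_true.mp hP) ',' hm
      simp [PySem.Chars.isspace] at this
    have hnc : ',' ∉ cur ++ pend := by simp [List.mem_append, hC, hCP]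
    simp only [List.nil_append, List.foldl_cons, List.foldl_nil, pvStepB, if_pos rfl]
    rw [List.append_nil, pvTok, pvSp_no_comma hnc, List.map_singleton,
      pvStrip_shape hP hH hT hE]
    cases hcur : cur with
    | nil => simp
    | cons a t => simp
  | cons ch cs' ih =>
    intro cur pend toks hP hH hT hE hC
    have hCP : ',' ∉ pend := by
      intro hm
      have := (List.all_eq_true.mp hP) ',' hm
      simp [PySem.Chars.isspace] at this
    have hnc : ',' ∉ cur ++ pend := by simp [List.mem_append, hC, hCP]
    by_cases hch : ch = ','
    · subst hch
      have hstep : pvStepB (cur, pend, toks) ',' =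
          ([], [], if cur = [] then toks else toks ++ [String.ofList cur]) := by
        simp [pvStepB]
      rw [List.cons_append, List.foldl_cons, hstep]
      rw [ih [] [] _ (by simp) (by simp) (by simp) (fun _ => rfl) (by simp)]
      have hsp := pvSp_comma_split (xs := cur ++ pend) cs' hnc
      simp only [pvTok, List.nil_append, hsp]
      simp only [List.map_cons, List.filter_cons, pvStrip_shape hP hH hT hE]
      cases hcur : cur with
      | nil => simp [hE hcur]
      | cons a t => simp [List.append_assoc]
    · by_cases hws : PySem.Chars.isspace ch = true
      · cases hcur : cur with
        | nil =>
          have hpendnil := hE hcur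
          subst hcur; subst hpendnil
          simp only [List.cons_append, List.foldl_cons, pvStepB, if_neg hch, hws, if_pos rfl,
            if_true]
          rw [ih [] [] toks (by simp) (by simp) (by simp) (fun _ => rfl) (by simp)]
          -- pvTok (ch :: cs') = pvTok cs' since ch is whitespace and not a comma
          obtain ⟨f, r, hfr⟩ : ∃ f r, pvSp cs' = f :: r := by
            cases h : pvSp cs' with
            | nil => exact absurd h (pvSp_ne_nil cs')
            | cons f r => exact ⟨f, r, rfl⟩
          have hstrip : PySem.Chars.strip (ch :: f) = PySem.Chars.strip f := by
            simp [PySem.Chars.strip, PySem.Chars.lstrip, List.dropWhile_cons, hws]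
          simp [pvTok, pvSp, hch, hfr, hstrip]
        | cons a t =>
          rw [← hcur]
          have hcurne : ¬ (cur = []) := by simp [hcur]
          simp only [List.cons_append, List.foldl_cons, pvStepB, if_neg hch, hws, if_true,
            if_neg hcurne]
          rw [ih cur (pend ++ [ch]) toks (by simp_all) hH hT (fun h => absurd h hcurne) hC]
          simp [List.append_assoc]
      · simp only [List.cons_append, List.foldl_cons, pvStepB, if_neg hch, hws,
          Bool.false_eq_true, if_false]
        have hH' : ∀ c, (cur ++ pend ++ [ch]).head? = some c → PySem.Chars.isspace c = false := by
          intro c hc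
          cases hcur : cur with
          | nil =>
            have := hE hcur
            subst hcur; subst this
            simp at hc
            subst hc
            simpa using hws
          | cons a t =>
            subst hcur
            simp at hc
            subst hc
            exact hH a (by simp)
        have hT' : ∀ c, (cur ++ pend ++ [ch]).getLast? = some c → PySem.Chars.isspace c = false := by
          intro c hc
          have hgl : (cur ++ pend ++ [ch]).getLast? = some ch := by simp
          rw [hgl] at hc
          injection hc with h
          subst h
          simpa using hws
        have hC' : ',' ∉ cur ++ pend ++ [ch] := by
          simp [List.mem_append, hC, hCP]
          exact fun h => hch h.symm
        rw [ih (cur ++ pend ++ [ch]) [] toks (by simp) hH' hT' (by simp) hC']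
        simp [List.append_assoc]

-- a duplicate-free list has no equal adjacent pair
theorem pvAdj_of_nodup : ∀ (s : List String), s.Nodup →
    (s.zip (s.drop 1)).any (fun p => p.1 == p.2) = false := by
  intro s
  induction s with
  | nil => intro _; rfl
  | cons a t ih =>
    intro hnd
    cases t with
    | nil => rfl
    | cons b u =>
      have hab : a ≠ b := by
        intro h; subst h
        exact (List.nodup_cons.mp hnd).1 (by simp)
      have hnt : (b :: u).Nodup := (List.nodup_cons.mp hnd).2
      simpa [hab] using ih hnt

-- A's parts list is pvTok of the text's characters
theorem pvFilterMap_eq (hemp : ∀ g : List Char, String.ofList g = "" ↔ g = []) :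
    ∀ (L : List (List Char)),
    (((L.map String.ofList).map PySem.Str.strip).filter (fun p => p ≠ "")) =
      ((L.map PySem.Chars.strip).filter (fun p => p ≠ [])).map String.ofList := by
  intro L
  induction L with
  | nil => rfl
  | cons f r ih =>
    have hstrip : PySem.Str.strip (String.ofList f) = String.ofList (PySem.Chars.strip f) := by
      rw [← String.toList_inj, PySem.Str.toList_strip, String.toList_ofList, String.toList_ofList]
    simp only [List.map_cons, List.filter_cons, hstrip]
    by_cases hf : PySem.Chars.strip f = []
    · rw [if_neg (by simp [(hemp _).mpr hf]), if_neg (by simp [hf])]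
      exact ih
    · rw [if_pos (by simp [hemp, hf]), if_pos (by simp [hf])]
      rw [List.map_cons, ih]

theorem pvParts_eq (s : String) :
    ((((PySem.Str.split? s ",").getD []).map PySem.Str.strip).filter (fun p => p ≠ "")) = pvTok s.toList := by
  have hemp : ∀ g : List Char, String.ofList g = "" ↔ g = [] := by
    intro g
    rw [← String.toList_inj, String.toList_ofList]
    simp
  have hsplit : PySem.Str.split? s "," = some ((pvSp s.toList).map String.ofList) := by
    simp [PySem.Str.split?, PySem.Chars.split?, pvSplitOn_eq]
  rw [hsplit]
  simp only [Option.getD_some, pvTok]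
  exact pvFilterMap_eq hemp (pvSp s.toList)

-- ===== VERDICT (by name: the statement is the Claim_ definition above) =====
set_option maxHeartbeats 1000000 in
theorem parse_target_tables_py_spec : Claim_equal_parse_target_tables_py := by
  intro value _ hpre
  unfold Spec_parse_target_tables_py
  match value with
  | none => rfl
  | some v =>
    have hparts := pvParts_eq (PySem.Str.strip v)
    have hloop := pvLoop_eq (PySem.Str.strip v).toList [] [] []
      (by simp) (by simp) (by simp) (fun _ => rfl) (by simp)
    simp only [List.append_nil, List.nil_append] at hloop
    have hnd : (pvTok (PySem.Str.strip v).toList).Nodup := by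
      rw [← hparts]; exact hpre
    have hslice : ∀ (L : List String), PySem.List.slice L (some 1) none = L.drop 1 := by
      intro L
      rw [PySem.List.slice_from L (by norm_num : (0:Int) ≤ 1)]
      norm_num
    have hsortnd : (PySem.List.sorted (pvTok (PySem.Str.strip v).toList) (fun x => x) false).Nodup :=
      (PySem.List.sorted_perm _ _ _).nodup_iff.mpr hnd
    have hadj := pvAdj_of_nodup _ hsortnd
    have hBeq : parse_target_tables_py_alt (some v) = pvTok (PySem.Str.strip v).toList := by
      simp only [parse_target_tables_py_alt]
      rw [hloop]
      simp only
      rw [hslice, hadj]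
      simp
    have hAeq : parse_target_tables_py (some v) = pvTok (PySem.Str.strip v).toList := by
      simp only [parse_target_tables_py]
      by_cases htext : PySem.Str.strip v = ""
      · rw [if_pos htext]
        have hcs : (PySem.Str.strip v).toList = [] := by rw [htext]; simp
        rw [hcs]
        simp [pvTok, pvSp, PySem.Chars.strip, PySem.Chars.lstrip, PySem.Chars.rstrip]
      · rw [if_neg htext]
        simp only [hparts]
        rw [PySem.Set.ofList_eq_self_of_nodup _ hnd]
        simp
    rw [hAeq, hBeq]
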